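-- pv_equiv track=rewrite | github.com/Tebemixer/Multiagent-techonoliges-SPBU-2025-master | matrix_generator.py | generate_adjacency_matrix
-- ===== SOURCE A (Python) =====
-- from typing import List
--
-- def generate_adjacency_matrix(count: int) -> List[List[int]]:
--     if count <= 1:
--         return [[0]]
--
--     matrix = [[0 for _ in range(count)] for _ in range(count)]
--     for index in range(count-1):
--         matrix[index][index+1] = 1
--         matrix[index+1][index] = 1
--     return matrix
-- ===== SOURCE B (Python) =====
-- from typing import List
--
-- def generate_adjacency_matrix(count: int) -> List[List[int]]:
--     if count <= 1:
--         return [[0]]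
--     return [[1 if abs(i - j) == 1 else 0 for j in range(count)] for i in range(count)]
-- ===== Notes on version B (the rewrite author's own statement) =====
-- stated objective: simpler
-- what changed: Replaces zero-filling the matrix and then mutating the two off-diagonal entries per index with a single nested comprehension computing each cell from the closed-form band predicate abs(i-j)==1.
import Mathlib
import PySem

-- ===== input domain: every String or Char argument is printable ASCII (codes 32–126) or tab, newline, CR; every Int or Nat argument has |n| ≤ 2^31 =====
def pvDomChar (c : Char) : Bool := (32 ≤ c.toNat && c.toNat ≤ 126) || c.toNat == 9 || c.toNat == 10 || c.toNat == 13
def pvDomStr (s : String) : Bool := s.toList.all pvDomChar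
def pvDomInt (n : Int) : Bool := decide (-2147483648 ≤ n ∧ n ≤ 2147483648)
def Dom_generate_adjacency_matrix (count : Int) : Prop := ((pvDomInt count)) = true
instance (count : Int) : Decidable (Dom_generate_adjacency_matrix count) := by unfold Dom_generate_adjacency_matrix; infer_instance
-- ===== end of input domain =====

-- B replaces A's zero-fill-then-mutate construction with a single nested comprehension
-- computing each cell from the band predicate abs(i-j)==1 (objective: simpler).

-- ===== PORT A =====
-- Literal port of A: build an n×n zero matrix, then for index in range(count-1) set the two
-- off-diagonal entries to 1. The loop indices produced by pyRange here are ≥ 0, so `.toNat` is exact.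
def generate_adjacency_matrix (count : Int) : List (List Int) :=
  if count ≤ 1 then [[0]]
  else
    let matrix := (PySem.List.pyRange 0 count 1).map
      (fun _ => (PySem.List.pyRange 0 count 1).map (fun _ => (0 : Int)))
    (PySem.List.pyRange 0 (count - 1) 1).foldl
      (fun m index =>
        (m.modify index.toNat (fun row => row.set (index.toNat + 1) 1)).modify
          (index.toNat + 1) (fun row => row.set index.toNat 1))
      matrix

-- ===== PORT B =====
def generate_adjacency_matrix_alt (count : Int) : List (List Int) :=
  if count ≤ 1 then [[0]]
  else (PySem.List.pyRange 0 count 1).map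
    (fun i => (PySem.List.pyRange 0 count 1).map
      (fun j => if (i - j).natAbs = 1 then (1 : Int) else 0))

-- ===== PRECONDITION & SPEC =====
def Spec_generate_adjacency_matrix (count : Int) (out : List (List Int)) : Prop := out = generate_adjacency_matrix_alt count
instance (count : Int) (out : List (List Int)) : Decidable (Spec_generate_adjacency_matrix count out) := by unfold Spec_generate_adjacency_matrix; infer_instance

-- ===== CLAIM (what is proved, stated in full; the proofs are below) =====
def Claim_equal_generate_adjacency_matrix : Prop := ∀ (count : Int), Dom_generate_adjacency_matrix count → Spec_generate_adjacency_matrix count (generate_adjacency_matrix count)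

-- ===== LEMMAS AND PROOFS =====

-- The matrix after A has processed indices 0 .. t-1: band entries with min i j < t are set.
def pvBand (n t : Nat) : List (List Int) :=
  (List.range n).map (fun (i : Nat) => (List.range n).map
    (fun (j : Nat) => if ((i : Int) - (j : Int)).natAbs = 1 ∧ min i j < t then (1 : Int) else 0))

lemma pv_set_map_range {n k : Nat} (f : Nat → Int) (v : Int) :
    ((List.range n).map f).set k v = (List.range n).map (fun j => if j = k then v else f j) := by
  apply List.ext_getElem?
  intro j
  by_cases h : j < n
  · by_cases h2 : k = j
    · simp [h, h2]
    · simp [h, h2]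
      exact fun h3 => absurd h3.symm h2
  · simp [h]

lemma pv_modify_map_range {n k : Nat} (f : Nat → List Int) (g : List Int → List Int) :
    ((List.range n).map f).modify k g
      = (List.range n).map (fun i => if i = k then g (f i) else f i) := by
  apply List.ext_getElem?
  intro i
  by_cases h : i < n
  · by_cases h2 : k = i <;> simp [h, h2, eq_comm]
  · simp [h]

lemma pv_step_band (n t : Nat) (ht : t + 1 < n) :
    ((pvBand n t).modify t (fun row => row.set (t + 1) 1)).modify (t + 1)
      (fun row => row.set t 1) = pvBand n (t + 1) := by
  unfold pvBand
  rw [pv_modify_map_range, pv_modify_map_range]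
  apply List.map_congr_left
  intro i hi
  rw [List.mem_range] at hi
  by_cases h1 : i = t
  · subst h1
    simp only [if_neg (by omega : ¬ i = i + 1)] at *
    rw [pv_set_map_range]
    apply List.map_congr_left
    intro j hj
    rw [List.mem_range] at hj
    split_ifs <;> omega
  · by_cases h2 : i = t + 1
    · subst h2
      simp only [if_neg h1]
      rw [pv_set_map_range]
      apply List.map_congr_left
      intro j hj
      rw [List.mem_range] at hj
      split_ifs <;> omega
    · simp only [if_neg h1, if_neg h2]
      apply List.map_congr_left
      intro j hj
      rw [List.mem_range] at hj
      split_ifs <;> omega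

lemma pv_fold_band (n t : Nat) (ht : t + 1 ≤ n) :
    (PySem.List.pyRange 0 (t : Int) 1).foldl
      (fun m index =>
        (m.modify index.toNat (fun row => row.set (index.toNat + 1) 1)).modify
          (index.toNat + 1) (fun row => row.set index.toNat 1))
      (pvBand n 0) = pvBand n t := by
  induction t with
  | zero => simp
  | succ t ih =>
    have h1 : ((t + 1 : Nat) : Int) = (t : Int) + 1 := by push_cast; ring
    rw [h1, PySem.List.pyRange_one_succ_right (by positivity), List.foldl_append]
    rw [ih (by omega)]
    simp only [List.foldl_cons, List.foldl_nil, Int.toNat_natCast]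
    exact pv_step_band n t (by omega)

lemma pv_fold_nat_band (n t : Nat) (ht : t + 1 ≤ n) :
    ((List.range t).map (fun (k : Nat) => (k : Int))).foldl
      (fun m index =>
        (m.modify index.toNat (fun row => row.set (index.toNat + 1) 1)).modify
          (index.toNat + 1) (fun row => row.set index.toNat 1))
      (pvBand n 0) = pvBand n t := by
  rw [← PySem.List.pyRange_zero_natCast t]
  exact pv_fold_band n t ht

lemma pv_band_zero (n : Nat) (l : List Int) (hl : l.length = n) :
    l.map (fun _ => l.map (fun _ => (0 : Int))) = pvBand n 0 := by
  unfold pvBand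
  rw [List.map_const', List.map_const', hl]
  have : ∀ i : Nat, (List.range n).map
      (fun (j : Nat) => if ((i : Int) - (j : Int)).natAbs = 1 ∧ min i j < 0 then (1 : Int) else 0)
      = List.replicate n 0 := by
    intro i
    rw [show (fun (j : Nat) => if ((i : Int) - (j : Int)).natAbs = 1 ∧ min i j < 0 then (1 : Int) else 0)
        = fun (_ : Nat) => (0 : Int) from funext (fun j => by simp)]
    rw [List.map_const', List.length_range]
  calc List.replicate n (List.replicate n (0 : Int))
      = (List.range n).map (fun _ => List.replicate n (0 : Int)) := by
        rw [List.map_const', List.length_range]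
    _ = _ := List.map_congr_left (fun i _ => (this i).symm)

-- ===== VERDICT (by name: the statement is the Claim_ definition above) =====
theorem generate_adjacency_matrix_spec : Claim_equal_generate_adjacency_matrix := by
  intro count _
  unfold Spec_generate_adjacency_matrix generate_adjacency_matrix generate_adjacency_matrix_alt
  by_cases hc : count ≤ 1
  · simp [hc]
  · obtain ⟨n, rfl⟩ : ∃ n : Nat, count = (n : Int) := ⟨count.toNat, by omega⟩
    have hn2 : 2 ≤ n := by exact_mod_cast (by omega : (2 : Int) ≤ (n : Int))
    simp only [if_neg hc]
    rw [PySem.List.pyRange_zero_natCast n,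
        show ((n : Int) - 1) = ((n - 1 : Nat) : Int) by omega,
        PySem.List.pyRange_zero_natCast (n - 1)]
    rw [pv_band_zero n _ (by simp), pv_fold_nat_band n (n - 1) (by omega)]
    unfold pvBand
    rw [List.map_map]
    apply List.map_congr_left
    intro i hi
    rw [List.mem_range] at hi
    simp only [Function.comp_apply, List.map_map]
    apply List.map_congr_left
    intro j hj
    rw [List.mem_range] at hj
    simp only [Function.comp_apply]
    split_ifs with ha hb hb <;> first | rfl | (exfalso; omega)
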